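-- pv_equiv track=rewrite | github.com/radisvaliullin/archive | original_sort.py | get_out_path_trace
-- ===== SOURCE A (Python) =====
-- from itertools import tee, zip_longest
--
-- def get_out_path_trace(sort_path, graph):
--
--     to_move_element = 0
--     for_move_element = 1
--     path_iter, next_path_iter = tee(sort_path, 2)
--     next(next_path_iter)
--
--     out_path_trace = []
--
--     for p, n_p in zip_longest(path_iter, next_path_iter, fillvalue=''):
--
--         out_path_trace_item = p
--         if n_p:
--             out_path_trace_item += ''.join([
--                 ' ', graph[p][n_p][to_move_element], '<->', graph[p][n_p][for_move_element],
--             ])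
--         else:
--             out_path_trace_item += '.'
--         out_path_trace.append(out_path_trace_item)
--
--     return out_path_trace
-- ===== SOURCE B (Python) =====
-- def get_out_path_trace(sort_path, graph):
--     # Walk the path BACKWARDS carrying the next element, build the trace
--     # back-to-front, and reverse once at the end.
--     out = []
--     nxt = ''
--     for p in reversed(sort_path):
--         if nxt:
--             edge = graph[p][nxt]
--             out.append(p + ' ' + edge[0] + '<->' + edge[1])
--         else:
--             out.append(p + '.')
--         nxt = p
--     out.reverse()
--     return out
-- ===== Notes on version B (the rewrite author's own statement) =====
-- stated objective: alternative
-- what changed: Replaces A's forward tee/zip_longest pairwise pairing by a backwards traversal that carries the NEXT element, emits the trace items back-to-front, and reverses the accumulator once at the end.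
import Mathlib
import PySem

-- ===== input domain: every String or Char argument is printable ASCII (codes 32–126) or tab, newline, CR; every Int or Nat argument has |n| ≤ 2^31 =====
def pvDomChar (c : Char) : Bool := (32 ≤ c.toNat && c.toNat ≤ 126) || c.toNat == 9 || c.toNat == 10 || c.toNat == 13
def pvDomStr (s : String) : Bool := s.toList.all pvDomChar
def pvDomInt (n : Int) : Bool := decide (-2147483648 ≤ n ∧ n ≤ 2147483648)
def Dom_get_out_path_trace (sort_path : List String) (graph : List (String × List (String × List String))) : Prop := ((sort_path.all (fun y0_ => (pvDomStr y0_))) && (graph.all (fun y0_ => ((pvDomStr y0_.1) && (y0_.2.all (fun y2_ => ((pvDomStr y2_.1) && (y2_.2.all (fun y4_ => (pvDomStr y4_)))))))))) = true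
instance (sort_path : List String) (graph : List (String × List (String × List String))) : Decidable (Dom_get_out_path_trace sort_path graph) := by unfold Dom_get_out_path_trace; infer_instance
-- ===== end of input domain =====

-- B replaces A's forward tee/zip_longest pairwise loop by a BACKWARDS traversal
-- carrying the next element, building the trace back-to-front and reversing once
-- at the end (objective: alternative). Return-value equivalence only; neither
-- program mutates its arguments.

-- ===== PORT A =====
-- zip_longest(path_iter, next_path_iter, fillvalue='') where next_path_iter = sort_path[1:]
def pvZipLongestFill : List String → List String → List (String × String)
  | [], [] => []
  | x :: xs, [] => (x, "") :: pvZipLongestFill xs []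
  | [], y :: ys => ("", y) :: pvZipLongestFill [] ys
  | x :: xs, y :: ys => (x, y) :: pvZipLongestFill xs ys

-- graph[p][n_p] (dict-of-dict lookup; Python raises KeyError where this defaults to [] — excluded by Pre_)
def pvEdgeA (graph : List (String × List (String × List String))) (p np : String) : List String :=
  (((PySem.Dict.mk graph).get? p).bind fun d => (PySem.Dict.mk d).get? np).getD []

-- the loop body: out_path_trace_item (graph[p][n_p][0]/[1] raise IndexError on short lists — excluded by Pre_)
def pvTraceItemA (graph : List (String × List (String × List String))) (p np : String) : String :=
  if np ≠ "" then
    PySem.Str.join "" [p, PySem.Str.join ""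
      [" ", PySem.List.pyGetD (pvEdgeA graph p np) 0 "", "<->", PySem.List.pyGetD (pvEdgeA graph p np) 1 ""]]
  else
    PySem.Str.join "" [p, "."]

def get_out_path_trace (sort_path : List String) (graph : List (String × List (String × List String))) : List String :=
  (pvZipLongestFill sort_path (sort_path.drop 1)).foldl
    (fun out_path_trace pn => out_path_trace ++ [pvTraceItemA graph pn.1 pn.2]) []

-- ===== PORT B =====
-- the body of `for p in reversed(sort_path):` — state is (out, nxt)
def pvStepB (graph : List (String × List (String × List String)))
    (st : List String × String) (p : String) : List String × String :=
  (st.1 ++ [if st.2 ≠ "" then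
      let edge := (((PySem.Dict.mk graph).get? p).bind fun d => (PySem.Dict.mk d).get? st.2).getD []
      p ++ " " ++ PySem.List.pyGetD edge 0 "" ++ "<->" ++ PySem.List.pyGetD edge 1 ""
    else p ++ "."], p)

def get_out_path_trace_alt (sort_path : List String) (graph : List (String × List (String × List String))) : List String :=
  ((sort_path.reverse.foldl (pvStepB graph) ([], "")).1).reverse

-- ===== PRECONDITION & SPEC =====
-- Pre_ = exactly the inputs where the Python A returns: a nonempty path
-- (next() on an empty iterator raises StopIteration) and, for every consecutive
-- pair with a truthy successor, both graph lookups succeed with an edge list of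
-- length ≥ 2 (otherwise Python raises KeyError / IndexError).
def Pre_get_out_path_trace (sort_path : List String) (graph : List (String × List (String × List String))) : Prop :=
  sort_path ≠ [] ∧
  ∀ pr ∈ sort_path.zip (sort_path.drop 1), pr.2 ≠ "" →
    2 ≤ ((((PySem.Dict.mk graph).get? pr.1).bind fun d => (PySem.Dict.mk d).get? pr.2).map List.length).getD 0
instance (sort_path : List String) (graph : List (String × List (String × List String))) : Decidable (Pre_get_out_path_trace sort_path graph) := by unfold Pre_get_out_path_trace; infer_instance

def pvWitness_get_out_path_trace : List String × (List (String × List (String × List String))) :=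
  (["a", "b"], [("a", [("b", ["1", "2"])])])

def Spec_get_out_path_trace (sort_path : List String) (graph : List (String × List (String × List String))) (out : List String) : Prop := out = get_out_path_trace_alt sort_path graph
instance (sort_path : List String) (graph : List (String × List (String × List String))) (out : List String) : Decidable (Spec_get_out_path_trace sort_path graph out) := by unfold Spec_get_out_path_trace; infer_instance

-- ===== CLAIM (what is proved, stated in full; the proofs are below) =====
def Claim_equal_get_out_path_trace : Prop := ∀ (sort_path : List String) (graph : List (String × List (String × List String))), Dom_get_out_path_trace sort_path graph → Pre_get_out_path_trace sort_path graph → Spec_get_out_path_trace sort_path graph (get_out_path_trace sort_path graph)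

-- ===== LEMMAS AND PROOFS =====

-- the common per-element item: element p with right neighbour nxt ('' past the end)
def pvItem (graph : List (String × List (String × List String))) (p nxt : String) : String :=
  if nxt ≠ "" then
    let edge := (((PySem.Dict.mk graph).get? p).bind fun d => (PySem.Dict.mk d).get? nxt).getD []
    p ++ " " ++ PySem.List.pyGetD edge 0 "" ++ "<->" ++ PySem.List.pyGetD edge 1 ""
  else p ++ "."

-- the forward reference list: items of x :: xs in order
def pvGo (graph : List (String × List (String × List String))) (x : String) : List String → List String
  | [] => [pvItem graph x ""]
  | y :: ys => pvItem graph x y :: pvGo graph y ys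

theorem pvGetLastD_cons (z nxt : String) (zs : List String) :
    (z :: zs).getLast?.getD nxt = zs.getLast?.getD z := by
  cases zs with
  | nil => simp
  | cons h t =>
      rw [List.getLast?_cons_cons]
      cases h' : (h :: t).getLast? with
      | none => simp [List.getLast?_eq_none_iff] at h'
      | some y => simp

theorem pvJoinEdge (a b c d e : String) :
    PySem.Str.join "" [a, PySem.Str.join "" [b, c, d, e]] = a ++ b ++ c ++ d ++ e := by
  rw [← String.toList_inj]
  simp [PySem.Str.join, PySem.Chars.join, List.intercalate]

theorem pvJoinDot (a : String) : PySem.Str.join "" [a, "."] = a ++ "." := by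
  rw [← String.toList_inj]
  simp [PySem.Str.join, PySem.Chars.join, List.intercalate]

-- A's loop body equals the common item function
theorem pvItem_eq (graph : List (String × List (String × List String))) (p np : String) :
    pvTraceItemA graph p np = pvItem graph p np := by
  unfold pvTraceItemA pvEdgeA pvItem
  split_ifs with h
  · exact pvJoinEdge _ _ _ _ _
  · exact pvJoinDot _

-- A's fold over the zip_longest pairs of x :: xs equals the forward reference list
theorem pvFold_eq_go (graph : List (String × List (String × List String))) :
    ∀ (xs : List String) (x : String) (acc : List String),
      (pvZipLongestFill (x :: xs) xs).foldl
          (fun out pn => out ++ [pvTraceItemA graph pn.1 pn.2]) acc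
        = acc ++ pvGo graph x xs := by
  intro xs
  induction xs with
  | nil =>
      intro x acc
      simp [pvZipLongestFill, pvGo, pvItem_eq]
  | cons y ys ih =>
      intro x acc
      simp only [pvZipLongestFill]
      rw [List.foldl_cons, ih y, pvGo, pvItem_eq, List.append_assoc, List.singleton_append]

-- output of a run of B's loop body over zs starting from (acc, nxt)
def pvH (graph : List (String × List (String × List String))) : List String → String → List String
  | [], _ => []
  | z :: zs, nxt => pvItem graph z nxt :: pvH graph zs z

theorem pvFoldB (graph : List (String × List (String × List String))) :
    ∀ (zs : List String) (acc : List String) (nxt : String),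
      zs.foldl (pvStepB graph) (acc, nxt) = (acc ++ pvH graph zs nxt, zs.getLastD nxt) := by
  intro zs
  induction zs with
  | nil => intro acc nxt; simp [pvH]
  | cons z zs ih =>
      intro acc nxt
      rw [List.foldl_cons]
      show List.foldl (pvStepB graph) (acc ++ [pvItem graph z nxt], z) zs = _
      rw [ih]
      simp [pvH, List.getLastD_eq_getLast?, pvGetLastD_cons]

theorem pvH_append (graph : List (String × List (String × List String))) :
    ∀ (as bs : List String) (nxt : String),
      pvH graph (as ++ bs) nxt = pvH graph as nxt ++ pvH graph bs (as.getLastD nxt) := by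
  intro as
  induction as with
  | nil => intro bs nxt; simp [pvH]
  | cons a as ih =>
      intro bs nxt
      simp [pvH, ih, List.getLastD_eq_getLast?, pvGetLastD_cons]

-- processing the reversed path with nxt = '' yields the forward items reversed
theorem pvH_reverse (graph : List (String × List (String × List String))) :
    ∀ (xs : List String) (x : String),
      pvH graph ((x :: xs).reverse) "" = (pvGo graph x xs).reverse := by
  intro xs
  induction xs with
  | nil => intro x; simp [pvH, pvGo]
  | cons y ys ih =>
      intro x
      have h1 : (x :: y :: ys).reverse = (y :: ys).reverse ++ [x] := by simp
      have h2 : ((y :: ys).reverse).getLastD "" = y := by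
        simp [List.getLastD_eq_getLast?, List.getLast?_reverse]
      rw [h1, pvH_append, ih, h2]
      simp [pvH, pvGo]

-- ===== VERDICT (by name: the statements are the Claim_ definitions above) =====
theorem get_out_path_trace_spec : Claim_equal_get_out_path_trace := by
  intro sort_path graph _ hpre
  unfold Spec_get_out_path_trace get_out_path_trace get_out_path_trace_alt
  cases sort_path with
  | nil => exact absurd rfl hpre.1
  | cons x xs =>
      rw [pvFoldB, pvH_reverse]
      simpa using pvFold_eq_go graph xs x []
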